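-- pv_equiv track=rewrite | github.com/fysoul17/devlyn-cli | .agents/skills/_shared/spec-verify-check.py | slice_diff_to_files
-- ===== SOURCE A (Python) =====
-- def slice_diff_to_files(diff_text: str, files: list[str]) -> str:
--     if not files:
--         return diff_text
--     out: list[str] = []
--     keep = False
--     for line in diff_text.splitlines(keepends=True):
--         if line.startswith("diff --git "):
--             keep = any(path in line for path in files)
--         if keep:
--             out.append(line)
--     return "".join(out)
-- ===== SOURCE B (Python) =====
-- def slice_diff_to_files(diff_text: str, files: list[str]) -> str:
--     if not files:
--         return diff_text
--     sections: list[list[str]] = []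
--     current: list[str] = []  # lines before the first header form the preamble
--     for line in diff_text.splitlines(keepends=True):
--         if line.startswith("diff --git "):
--             sections.append(current)
--             current = [line]
--         else:
--             current.append(line)
--     sections.append(current)
--     kept = [sec for sec in sections[1:]
--             if any(path in sec[0] for path in files)]
--     return "".join(line for sec in kept for line in sec)
-- ===== Notes on version B (the rewrite author's own statement) =====
-- stated objective: alternative
-- what changed: B splits the diff into header-delimited sections first (discarding the preamble) and then keeps whole sections whose header matches, instead of A's single pass carrying a per-line keep flag.
import Mathlib
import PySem

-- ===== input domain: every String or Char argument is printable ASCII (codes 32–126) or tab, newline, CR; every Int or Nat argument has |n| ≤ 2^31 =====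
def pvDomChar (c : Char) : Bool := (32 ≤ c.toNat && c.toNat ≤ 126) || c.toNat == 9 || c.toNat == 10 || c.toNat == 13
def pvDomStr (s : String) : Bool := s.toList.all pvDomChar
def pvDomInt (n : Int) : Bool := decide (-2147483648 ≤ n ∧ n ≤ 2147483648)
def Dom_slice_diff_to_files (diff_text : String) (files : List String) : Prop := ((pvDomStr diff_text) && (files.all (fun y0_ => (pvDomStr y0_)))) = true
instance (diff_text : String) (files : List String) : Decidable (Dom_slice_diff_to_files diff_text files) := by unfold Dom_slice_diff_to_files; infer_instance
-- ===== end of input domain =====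

-- B partitions the diff into header-delimited sections first and then selects whole
-- sections, instead of A's per-line keep flag: a different decomposition, same cost.

-- Hand port of str.splitlines(keepends=True), shared by both ports (it is the same
-- Python builtin in both). Exact on Dom: the only line breaks occurring there are
-- '\n', '\r' and '\r\n' (Python's extra breaks \v, \f, \x1c-\x1e, \x85, … are outside Dom).
def pvSplitlinesKeep (acc : List Char) : List Char → List (List Char)
  | [] => if acc = [] then [] else [acc.reverse]
  | '\r' :: '\n' :: rest => (acc.reverse ++ ['\r', '\n']) :: pvSplitlinesKeep [] rest
  | '\n' :: rest => (acc.reverse ++ ['\n']) :: pvSplitlinesKeep [] rest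
  | '\r' :: rest => (acc.reverse ++ ['\r']) :: pvSplitlinesKeep [] rest
  | c :: rest => pvSplitlinesKeep (c :: acc) rest

-- line.startswith("diff --git ") / any(path in line for path in files): used verbatim by both Pythons
def pvIsHdr (line : List Char) : Bool := PySem.Chars.startswith line ("diff --git ".toList)
def pvKeep (files : List String) (line : List Char) : Bool := files.any (fun p => PySem.Chars.isIn p.toList line)

-- ===== PORT A =====
def slice_diff_to_files (diff_text : String) (files : List String) : String :=
  if files.isEmpty then diff_text
  else
    String.ofList
      ((pvSplitlinesKeep [] diff_text.toList).foldl
        (fun (s : Bool × List Char) line =>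
          let keep := if pvIsHdr line then pvKeep files line else s.1
          (keep, if keep then s.2 ++ line else s.2))
        (false, [])).2

-- ===== PORT B =====
def slice_diff_to_files_alt (diff_text : String) (files : List String) : String :=
  if files.isEmpty then diff_text
  else
    let st :=
      (pvSplitlinesKeep [] diff_text.toList).foldl
        (fun (s : List (List (List Char)) × List (List Char)) line =>
          if pvIsHdr line then (s.1 ++ [s.2], [line]) else (s.1, s.2 ++ [line]))
        ([], [])
    let sections := st.1 ++ [st.2]
    String.ofList
      (((sections.drop 1).filter (fun sec => pvKeep files (sec.headD []))).flatten.flatten)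

-- ===== PRECONDITION & SPEC =====
def Spec_slice_diff_to_files (diff_text : String) (files : List String) (out : String) : Prop := out = slice_diff_to_files_alt diff_text files
instance (diff_text : String) (files : List String) (out : String) : Decidable (Spec_slice_diff_to_files diff_text files out) := by unfold Spec_slice_diff_to_files; infer_instance

-- ===== CLAIM (what is proved, stated in full; the proofs are below) =====
def Claim_equal_slice_diff_to_files : Prop := ∀ (diff_text : String) (files : List String), Dom_slice_diff_to_files diff_text files → Spec_slice_diff_to_files diff_text files (slice_diff_to_files diff_text files)

-- ===== LEMMAS AND PROOFS =====

-- What A's loop emits from the remaining lines, given the current keep flag.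
def pvSel (files : List String) : List (List Char) → Bool → List Char
  | [], _ => []
  | l :: ls, keep =>
    let k := if pvIsHdr l then pvKeep files l else keep
    (if k then l else []) ++ pvSel files ls k

lemma aFold_eq_sel (files : List String) (lines : List (List Char)) :
    ∀ (keep : Bool) (out : List Char),
      (lines.foldl
        (fun (s : Bool × List Char) line =>
          let keep := if pvIsHdr line then pvKeep files line else s.1
          (keep, if keep then s.2 ++ line else s.2))
        (keep, out)).2 = out ++ pvSel files lines keep := by
  induction lines with
  | nil => intro keep out; simp [pvSel]
  | cons l ls ih =>
    intro keep out
    simp only [List.foldl_cons, pvSel, ih]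
    by_cases h : (if pvIsHdr l then pvKeep files l else keep) = true <;>
      simp [h, List.append_assoc]

-- The section split that B's fold computes.
def pvSplitFrom : List (List Char) → List (List Char) → List (List (List Char))
  | cur, [] => [cur]
  | cur, l :: ls => if pvIsHdr l then cur :: pvSplitFrom [l] ls else pvSplitFrom (cur ++ [l]) ls

lemma bFold_eq_splitFrom (lines : List (List Char)) :
    ∀ (secs : List (List (List Char))) (cur : List (List Char)),
      (lines.foldl
        (fun (s : List (List (List Char)) × List (List Char)) line =>
          if pvIsHdr line then (s.1 ++ [s.2], [line]) else (s.1, s.2 ++ [line]))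
        (secs, cur)).1 ++
      [(lines.foldl
        (fun (s : List (List (List Char)) × List (List Char)) line =>
          if pvIsHdr line then (s.1 ++ [s.2], [line]) else (s.1, s.2 ++ [line]))
        (secs, cur)).2] = secs ++ pvSplitFrom cur lines := by
  induction lines with
  | nil => intro secs cur; simp [pvSplitFrom]
  | cons l ls ih =>
    intro secs cur
    simp only [List.foldl_cons, pvSplitFrom]
    by_cases h : pvIsHdr l <;> simp [h, ih]

-- Selecting whole sections (each starting with its header line) equals A's flag-driven scan.
lemma flatten_filter_splitFrom (files : List String) (ls : List (List Char)) :
    ∀ (cur : List (List Char)) (keep : Bool), cur ≠ [] →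
      pvKeep files (cur.headD []) = keep →
      ((pvSplitFrom cur ls).filter (fun sec => pvKeep files (sec.headD []))).flatten.flatten
        = (if keep then cur.flatten else []) ++ pvSel files ls keep := by
  induction ls with
  | nil =>
    intro cur keep _ hk
    simp only [pvSplitFrom, List.filter_cons, List.filter_nil]
    rw [hk]
    cases keep <;> simp [pvSel]
  | cons l ls ih =>
    intro cur keep hne hk
    by_cases h : pvIsHdr l = true
    · simp only [pvSplitFrom, if_pos h, List.filter_cons]
      rw [hk]
      have hrec := ih [l] (pvKeep files l) (by simp) (by simp)
      cases hkp : keep <;> cases hl : pvKeep files l <;>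
        simp_all [pvSel]
    · have hh : (cur ++ [l]).headD [] = cur.headD [] := by
        cases cur with
        | nil => exact absurd rfl hne
        | cons a as => simp
      simp only [pvSplitFrom, if_neg h]
      rw [ih (cur ++ [l]) keep (by simp) (by rw [hh, hk])]
      cases hkp : keep <;> simp [pvSel, h, List.append_assoc]

lemma drop_filter_splitFrom (files : List String) (ls : List (List Char)) :
    ∀ (cur : List (List Char)),
      (((pvSplitFrom cur ls).drop 1).filter (fun sec => pvKeep files (sec.headD []))).flatten.flatten
        = pvSel files ls false := by
  induction ls with
  | nil => intro cur; simp [pvSplitFrom, pvSel]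
  | cons l ls ih =>
    intro cur
    by_cases h : pvIsHdr l = true
    · simp only [pvSplitFrom, if_pos h, List.drop_succ_cons, List.drop_zero]
      rw [flatten_filter_splitFrom files ls [l] (pvKeep files l) (by simp) (by simp)]
      cases hl : pvKeep files l <;> simp [pvSel, h, hl]
    · simp only [pvSplitFrom, if_neg h]
      rw [ih (cur ++ [l])]
      simp [pvSel, h]

-- ===== VERDICT (by name: the statement is the Claim_ definition above) =====
theorem slice_diff_to_files_spec : Claim_equal_slice_diff_to_files := by
  intro diff_text files _
  unfold Spec_slice_diff_to_files slice_diff_to_files slice_diff_to_files_alt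
  by_cases h : files.isEmpty
  · simp [h]
  · simp only [h, if_false, Bool.false_eq_true]
    congr 1
    rw [aFold_eq_sel files _ false []]
    have hb := bFold_eq_splitFrom (pvSplitlinesKeep [] diff_text.toList) [] []
    simp only [List.nil_append] at hb
    have : ((pvSplitlinesKeep [] diff_text.toList).foldl
        (fun (s : List (List (List Char)) × List (List Char)) line =>
          if pvIsHdr line then (s.1 ++ [s.2], [line]) else (s.1, s.2 ++ [line]))
        ([], [])).1 ++
      [((pvSplitlinesKeep [] diff_text.toList).foldl
        (fun (s : List (List (List Char)) × List (List Char)) line =>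
          if pvIsHdr line then (s.1 ++ [s.2], [line]) else (s.1, s.2 ++ [line]))
        ([], [])).2] = pvSplitFrom [] (pvSplitlinesKeep [] diff_text.toList) := hb
    rw [this, drop_filter_splitFrom files _ []]
    simp
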